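-- pv_equiv track=rewrite | github.com/HEmile/juggl | src/format/util.py | get_tags_from_line
-- ===== SOURCE A (Python) =====
-- def get_tags_from_line(line) -> [str]:
--     pos_tags = [i for i, char in enumerate(line) if char == '#']
--     tags = []
--     for i in pos_tags:
--         if i == 0 or line[i - 1] == ' ':
--             tag = line[i+1:line.find(' ', i+1)]
--             if len(tag) > 0 and tag[0] != "#":
--                 tags.append(tag)
--     return tags
-- ===== SOURCE B (Python) =====
-- def get_tags_from_line(line) -> [str]:
--     # one left-to-right pass: buf collects the chars of the current '#'-word
--     # (after the '#'); a word ends at a space or at the end of the line.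
--     tags = []
--     buf = None        # None: current word is not a tag word
--     boundary = True   # at the start of a word?
--     for ch in line:
--         if ch == ' ':
--             if buf is not None and buf != '' and buf[0] != '#':
--                 tags.append(buf)
--             buf = None
--             boundary = True
--         else:
--             if boundary and ch == '#':
--                 buf = ''
--             elif buf is not None:
--                 buf = buf + ch
--             boundary = False
--     if buf is not None and buf != '' and buf[0] != '#':
--         tags.append(buf)
--     return tags
-- ===== Notes on version B (the rewrite author's own statement) =====
-- stated objective: faster
-- what changed: B replaces A's enumerate-all-'#'-positions plus a repeated line.find(' ', i+1) scan per hashtag by a single left-to-right state-machine pass that accumulates the current tag word, so the line is traversed once.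
-- intended difference: On lines whose last word is a hashtag (a word-start '#' followed by a non-'#' character with no space after it), A returns that tag with its final character chopped off (or drops a 2-character tag entirely) because line.find(' ', i+1) == -1 makes the slice line[i+1:-1]; B returns the full tag up to the end of the line, which is clearly the intended value. — e.g. on get_tags_from_line("#a"): A returns [], B returns ["a"]
import Mathlib
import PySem

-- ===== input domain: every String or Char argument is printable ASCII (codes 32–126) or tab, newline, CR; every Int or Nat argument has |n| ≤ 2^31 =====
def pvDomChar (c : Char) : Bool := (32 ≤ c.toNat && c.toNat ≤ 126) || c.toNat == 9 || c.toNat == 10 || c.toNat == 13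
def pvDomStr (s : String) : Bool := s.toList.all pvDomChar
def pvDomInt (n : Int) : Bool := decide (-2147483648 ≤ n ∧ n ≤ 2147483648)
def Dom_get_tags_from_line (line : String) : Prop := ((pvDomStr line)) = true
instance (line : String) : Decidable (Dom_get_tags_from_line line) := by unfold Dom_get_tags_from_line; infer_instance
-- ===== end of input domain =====

-- B replaces A's scan over all '#' positions with repeated find-next-space by one left-to-right
-- state-machine pass over the characters (objective: faster, one traversal instead of a re-scan per tag).

-- ===== PORT A =====
def get_tags_from_line (line : String) : List String :=
  let l := line.toList
  let pos_tags : List Int :=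
    (PySem.List.enumerate l).filterMap (fun p => if p.2 = '#' then some p.1 else none)
  pos_tags.foldl (fun tags i =>
    if i = 0 ∨ PySem.List.pyGet? l (i - 1) = some ' ' then
      let tag := PySem.List.slice l (some (i + 1)) (some (PySem.Chars.findFrom l [' '] (i + 1)))
      if 0 < tag.length ∧ PySem.List.pyGet? tag 0 ≠ some '#' then tags ++ [String.ofList tag]
      else tags
    else tags) []

-- ===== PORT B =====
-- B-side helpers: the loop body of Source B's single pass (state = (tags, buf, boundary)) and the
-- word-end emission that Source B performs at a space and once more after the loop.
def bFlush (tags : List String) (buf : Option (List Char)) : List String :=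
  match buf with
  | some b => if b ≠ [] ∧ b.head? ≠ some '#' then tags ++ [String.ofList b] else tags
  | none => tags

def bStep (st : List String × Option (List Char) × Bool) (ch : Char) :
    List String × Option (List Char) × Bool :=
  if ch = ' ' then
    (bFlush st.1 st.2.1, none, true)
  else if st.2.2 ∧ ch = '#' then
    (st.1, some [], false)
  else
    match st.2.1 with
    | some b => (st.1, some (b ++ [ch]), false)
    | none => (st.1, none, false)

def get_tags_from_line_alt (line : String) : List String :=
  let st := line.toList.foldl bStep ([], none, true)
  bFlush st.1 st.2.1

-- ===== PRECONDITION & SPEC =====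
-- On lines whose last word is a hashtag (a word-start '#' followed by a non-'#' character with no
-- space after it) A returns that tag with its final character chopped off (or drops a 2-character
-- tag entirely), because line.find(' ', i+1) == -1 turns the slice into line[i+1:-1]; B returns the
-- full tag up to the end of the line, which is the intended value.
-- line.toList.reverse.idxOf ' ' is the length of the line's last word (its maximal
-- space-free suffix); the two lookups are that word's first and second character.
def D_get_tags_from_line (line : String) : Prop :=
  2 ≤ line.toList.reverse.idxOf ' ' ∧
  line.toList.reverse[line.toList.reverse.idxOf ' ' - 1]? = some '#' ∧
  line.toList.reverse[line.toList.reverse.idxOf ' ' - 2]? ≠ some '#' 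
instance (line : String) : Decidable (D_get_tags_from_line line) := by
  unfold D_get_tags_from_line; infer_instance

def Spec_get_tags_from_line (line : String) (out : List String) : Prop :=
  ¬ D_get_tags_from_line line → out = get_tags_from_line_alt line
instance (line : String) (out : List String) : Decidable (Spec_get_tags_from_line line out) := by
  unfold Spec_get_tags_from_line; infer_instance

def pvDiffWitness_get_tags_from_line : String := "#a"
def pvDiffWitnessOut_get_tags_from_line : (List String) × (List String) := ([], ["a"])

-- ===== CLAIM (what is proved, stated in full; the proofs are below) =====
def Claim_unchanged_get_tags_from_line : Prop :=
  ∀ (line : String), Dom_get_tags_from_line line →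
    Spec_get_tags_from_line line (get_tags_from_line line)
def Claim_changed_get_tags_from_line : Prop :=
  Dom_get_tags_from_line (pvDiffWitness_get_tags_from_line) ∧
  D_get_tags_from_line (pvDiffWitness_get_tags_from_line) ∧
  get_tags_from_line (pvDiffWitness_get_tags_from_line) = pvDiffWitnessOut_get_tags_from_line.1 ∧
  get_tags_from_line_alt (pvDiffWitness_get_tags_from_line) = pvDiffWitnessOut_get_tags_from_line.2 ∧
  pvDiffWitnessOut_get_tags_from_line.1 ≠ pvDiffWitnessOut_get_tags_from_line.2

-- ===== LEMMAS AND PROOFS =====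

-- The word decomposition both characterizations are proved against.
def pvNotSpace (c : Char) : Bool := c ≠ ' '

def pvWords (l : List Char) : List (List Char) :=
  if _h : ' ' ∈ l then
    l.takeWhile pvNotSpace :: pvWords ((l.dropWhile pvNotSpace).tail)
  else [l]
termination_by l.length
decreasing_by
  have hd : l.dropWhile pvNotSpace ≠ [] := by
    simp only [ne_eq, List.dropWhile_eq_nil_iff]
    intro hall; have := hall ' ' _h; simp [pvNotSpace] at this
  have h1 : (l.dropWhile pvNotSpace).length ≤ l.length := l.length_dropWhile_le _
  have h2 : ((l.dropWhile pvNotSpace).tail).length < (l.dropWhile pvNotSpace).length := by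
    cases hx : l.dropWhile pvNotSpace with
    | nil => exact absurd hx hd
    | cons a t => simp
  omega

-- what Source B emits for a whole word
def pvFb (w : List Char) : Option String :=
  if w.head? = some '#' ∧ 1 < w.length ∧ w[1]? ≠ some '#' then some (String.ofList (w.drop 1))
  else none

-- what Source B emits for a buffered tag body
def pvEmit (b : List Char) : List String :=
  if b ≠ [] ∧ b.head? ≠ some '#' then [String.ofList b] else []

-- A-side decomposition: '#' positions and the per-position contribution
def pvHpos (l : List Char) : List Int :=
  (PySem.List.enumerate l).filterMap (fun p => if p.2 = '#' then some p.1 else none)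

def pvTag (l : List Char) (i : Int) : List Char :=
  PySem.List.slice l (some (i + 1)) (some (PySem.Chars.findFrom l [' '] (i + 1)))

def pvGa (l : List Char) (i : Int) : Option String :=
  if i = 0 ∨ PySem.List.pyGet? l (i - 1) = some ' ' then
    if 0 < (pvTag l i).length ∧ PySem.List.pyGet? (pvTag l i) 0 ≠ some '#' then
      some (String.ofList (pvTag l i))
    else none
  else none

def pvAtags (l : List Char) : List String := (pvHpos l).filterMap (pvGa l)

lemma bFlush_some (tags : List String) (b : List Char) :
    bFlush tags (some b) = tags ++ pvEmit b := by
  simp only [bFlush, pvEmit]; split_ifs <;> simp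

lemma pvFb_hash (t : List Char) : (pvFb ('#'::t)).toList = pvEmit t := by
  simp only [pvFb, pvEmit]
  cases t with
  | nil => simp
  | cons a r => by_cases ha : a = '#' <;> simp [ha]

lemma filterMap_cons_toList {α β : Type} (f : α → Option β) (a : α) (l : List α) :
    List.filterMap f (a :: l) = (f a).toList ++ List.filterMap f l := by
  cases h : f a <;> simp [h]

lemma tw_space (r : List Char) : (' ' :: r).takeWhile pvNotSpace = [] := by
  rw [List.takeWhile_cons_of_neg]; simp [pvNotSpace]

lemma dw_space (r : List Char) : (' ' :: r).dropWhile pvNotSpace = ' ' :: r := by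
  rw [List.dropWhile_cons_of_neg]; simp [pvNotSpace]

lemma tw_pos {c : Char} (hc : c ≠ ' ') (r : List Char) :
    (c :: r).takeWhile pvNotSpace = c :: r.takeWhile pvNotSpace := by
  rw [List.takeWhile_cons_of_pos]; simp [pvNotSpace, hc]

lemma dw_pos {c : Char} (hc : c ≠ ' ') (r : List Char) :
    (c :: r).dropWhile pvNotSpace = r.dropWhile pvNotSpace := by
  rw [List.dropWhile_cons_of_pos]; simp [pvNotSpace, hc]

lemma pvWords_of_mem {l : List Char} (h : ' ' ∈ l) :
    pvWords l = l.takeWhile pvNotSpace :: pvWords ((l.dropWhile pvNotSpace).tail) := by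
  rw [pvWords]; simp [h]

lemma pvWords_of_not_mem {l : List Char} (h : ' ' ∉ l) : pvWords l = [l] := by
  rw [pvWords]; simp [h]

lemma portA_eq (line : String) : get_tags_from_line line = pvAtags line.toList := by
  have h : ∀ (l : List Char),
      (pvHpos l).foldl (fun tags i =>
        if i = 0 ∨ PySem.List.pyGet? l (i - 1) = some ' ' then
          let tag := PySem.List.slice l (some (i + 1)) (some (PySem.Chars.findFrom l [' '] (i + 1)))
          if 0 < tag.length ∧ PySem.List.pyGet? tag 0 ≠ some '#' then tags ++ [String.ofList tag]
          else tags
        else tags) [] = (pvHpos l).filterMap (pvGa l) := by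
    intro l
    have hfun : (fun (tags : List String) (i : Int) =>
        if i = 0 ∨ PySem.List.pyGet? l (i - 1) = some ' ' then
          let tag := PySem.List.slice l (some (i + 1)) (some (PySem.Chars.findFrom l [' '] (i + 1)))
          if 0 < tag.length ∧ PySem.List.pyGet? tag 0 ≠ some '#' then tags ++ [String.ofList tag]
          else tags
        else tags) = fun tags i => tags ++ (pvGa l i).toList := by
      funext tags i
      simp only [pvGa, pvTag]
      split_ifs <;> simp
    rw [hfun, PySem.List.foldl_append_eq_flatMap, List.nil_append,
      List.filterMap_eq_flatMap_toList]
  exact h line.toList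

-- the single-pass invariant of Source B's loop, for each of the three states
lemma bloop (l : List Char) : ∀ (tags : List String),
    (bFlush (l.foldl bStep (tags, none, true)).1 (l.foldl bStep (tags, none, true)).2.1
       = tags ++ (pvWords l).filterMap pvFb)
  ∧ (∀ b, bFlush (l.foldl bStep (tags, some b, false)).1 (l.foldl bStep (tags, some b, false)).2.1
       = tags ++ (if ' ' ∈ l
           then pvEmit (b ++ l.takeWhile pvNotSpace) ++
                (pvWords ((l.dropWhile pvNotSpace).tail)).filterMap pvFb
           else pvEmit (b ++ l)))
  ∧ (bFlush (l.foldl bStep (tags, none, false)).1 (l.foldl bStep (tags, none, false)).2.1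
       = tags ++ (if ' ' ∈ l then (pvWords ((l.dropWhile pvNotSpace).tail)).filterMap pvFb else [])) := by
  induction l with
  | nil =>
    intro tags
    have hw : pvWords ([] : List Char) = [[]] := pvWords_of_not_mem (by simp)
    refine ⟨?_, ?_, ?_⟩
    · simp [bFlush, hw, pvFb]
    · intro b; simp [bFlush_some]
    · simp [bFlush]
  | cons c rest ih =>
    intro tags
    by_cases hc : c = ' '
    · subst hc
      have hmem : (' ' : Char) ∈ ' ' :: rest := List.mem_cons_self
      have hs1 : bStep (tags, none, true) ' ' = (tags, none, true) := by
        simp [bStep, bFlush]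
      have hs3 : bStep (tags, none, false) ' ' = (tags, none, true) := by
        simp [bStep, bFlush]
      refine ⟨?_, ?_, ?_⟩
      · rw [List.foldl_cons, hs1, (ih tags).1, pvWords_of_mem hmem, filterMap_cons_toList,
          tw_space, dw_space]
        simp [pvFb]
      · intro b
        have hs2 : bStep (tags, some b, false) ' ' = (tags ++ pvEmit b, none, true) := by
          simp [bStep, bFlush_some]
        rw [List.foldl_cons, hs2, (ih (tags ++ pvEmit b)).1, if_pos hmem, tw_space, dw_space]
        simp [List.append_assoc]
      · rw [List.foldl_cons, hs3, (ih tags).1, if_pos hmem, dw_space]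
        simp
    · have hmem : (' ' : Char) ∈ c :: rest ↔ (' ' : Char) ∈ rest := by
        simp [Ne.symm hc]
      refine ⟨?_, ?_, ?_⟩
      · by_cases hh : c = '#'
        · subst hh
          have hs : bStep (tags, none, true) '#' = (tags, some [], false) := by
            simp [bStep]
          rw [List.foldl_cons, hs, ((ih tags).2.1) []]
          by_cases hr : (' ' : Char) ∈ rest
          · rw [if_pos hr, pvWords_of_mem (hmem.mpr hr), filterMap_cons_toList,
              tw_pos hc, dw_pos hc, pvFb_hash]
            simp
          · rw [if_neg hr, pvWords_of_not_mem (fun hx => hr (hmem.mp hx)),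
              filterMap_cons_toList, pvFb_hash]
            simp
        · have hs : bStep (tags, none, true) c = (tags, none, false) := by
            simp [bStep, hc, hh]
          rw [List.foldl_cons, hs, (ih tags).2.2]
          have hfb : ∀ r : List Char, pvFb (c :: r) = none := by
            intro r; simp [pvFb, hh]
          by_cases hr : (' ' : Char) ∈ rest
          · rw [if_pos hr, pvWords_of_mem (hmem.mpr hr), filterMap_cons_toList,
              tw_pos hc, dw_pos hc, hfb]
            simp
          · rw [if_neg hr, pvWords_of_not_mem (fun hx => hr (hmem.mp hx)),
              filterMap_cons_toList, hfb]
            simp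
      · intro b
        have hs : bStep (tags, some b, false) c = (tags, some (b ++ [c]), false) := by
          simp [bStep, hc]
        rw [List.foldl_cons, hs, ((ih tags).2.1) (b ++ [c])]
        by_cases hr : (' ' : Char) ∈ rest
        · rw [if_pos hr, if_pos (hmem.mpr hr), tw_pos hc, dw_pos hc]
          simp [List.append_assoc]
        · rw [if_neg hr, if_neg (fun hx => hr (hmem.mp hx))]
          simp [List.append_assoc]
      · have hs : bStep (tags, none, false) c = (tags, none, false) := by
          rcases Bool.decEq (decide (c = '#')) true with h | h <;> simp [bStep, hc]
        rw [List.foldl_cons, hs, (ih tags).2.2]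
        by_cases hr : (' ' : Char) ∈ rest
        · rw [if_pos hr, if_pos (hmem.mpr hr), dw_pos hc]
        · rw [if_neg hr, if_neg (fun hx => hr (hmem.mp hx))]

lemma portB_eq (line : String) :
    get_tags_from_line_alt line = (pvWords line.toList).filterMap pvFb := by
  have := (bloop line.toList []).1
  simpa [get_tags_from_line_alt] using this

-- ---- A-side: '#' positions ----
lemma pvHpos_shift (t : List Char) : ∀ (s : Int),
    (PySem.List.enumerate t s).filterMap (fun p => if p.2 = '#' then some p.1 else none)
      = ((PySem.List.enumerate t 0).filterMap (fun p => if p.2 = '#' then some p.1 else none)).map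
          (· + s) := by
  induction t with
  | nil => intro s; simp [PySem.List.enumerate]
  | cons c t ih =>
    intro s
    rw [PySem.List.enumerate_cons, PySem.List.enumerate_cons]
    simp only [List.filterMap_cons]
    by_cases hc : c = '#' <;>
    · simp [hc, ih (s+1)]
      rw [ih 1, List.map_map]
      apply List.map_congr_left
      intro a _
      simp [Function.comp]
      omega

lemma pvHpos_append (xs ys : List Char) :
    pvHpos (xs ++ ys) = pvHpos xs ++ (pvHpos ys).map (· + (xs.length : Int)) := by
  unfold pvHpos
  rw [PySem.List.enumerate_append, List.filterMap_append, pvHpos_shift ys (0 + xs.length)]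
  simp

lemma pvHpos_cons (c : Char) (t : List Char) :
    pvHpos (c :: t) = (if c = '#' then [(0:Int)] else []) ++ (pvHpos t).map (· + 1) := by
  unfold pvHpos
  rw [PySem.List.enumerate_cons, List.filterMap_cons, pvHpos_shift t (0+1)]
  by_cases hc : c = '#' <;> simp [hc]

lemma mem_pvHpos {l : List Char} {i : Int} (h : i ∈ pvHpos l) :
    ∃ k : Nat, i = (k : Int) ∧ k < l.length ∧ l[k]? = some '#' := by
  unfold pvHpos at h
  rw [List.mem_filterMap] at h
  obtain ⟨p, hp, hif⟩ := h
  rw [PySem.List.mem_enumerate_iff] at hp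
  obtain ⟨k, hk, rfl⟩ := hp
  by_cases hc : l[k] = '#'
  · refine ⟨k, ?_, hk, ?_⟩
    · simp [hc] at hif; omega
    · rw [List.getElem?_eq_getElem hk, hc]
  · simp [hc] at hif

-- ---- find ' ' ----
lemma singleton_prefix_head? {a : Char} {t : List Char} : [a] <+: t ↔ t.head? = some a := by
  constructor
  · rintro ⟨s, rfl⟩; rfl
  · intro h; cases t with
    | nil => simp at h
    | cons b r => simp at h; subst h; exact ⟨r, rfl⟩

lemma find_first_space (u v : List Char) (hu : ' ' ∉ u) :
    PySem.Chars.find (u ++ ' ' :: v) [' '] = (u.length : Int) := by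
  have hinf : [' '] <:+: u ++ ' ' :: v := (List.singleton_infix_iff _ _).mpr (by simp)
  have h0 : 0 ≤ PySem.Chars.find (u ++ ' ' :: v) [' '] :=
    (PySem.Chars.find_nonneg_iff _ _).mpr hinf
  obtain ⟨hpre, hmin⟩ := PySem.Chars.find_spec h0
  have hAt : (u ++ ' ' :: v)[(PySem.Chars.find (u ++ ' ' :: v) [' ']).toNat]? = some ' ' := by
    rw [← List.head?_drop]; exact singleton_prefix_head?.mp hpre
  have heq : (PySem.Chars.find (u ++ ' ' :: v) [' ']).toNat = u.length := by
    rcases Nat.lt_trichotomy (PySem.Chars.find (u ++ ' ' :: v) [' ']).toNat u.length with h | h | h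
    · exfalso
      rw [List.getElem?_append_left h] at hAt
      exact hu (List.mem_of_getElem? hAt)
    · exact h
    · exfalso
      refine hmin u.length h (singleton_prefix_head?.mpr ?_)
      rw [List.drop_left]
      rfl
  omega

lemma find_no_space (s : List Char) (h : ' ' ∉ s) : PySem.Chars.find s [' '] = -1 :=
  (PySem.Chars.find_eq_neg_one_iff _ _).mpr (fun hinf => h ((List.singleton_infix_iff _ _).mp hinf))

def pvDb (l : List Char) : Bool :=
  (List.range l.length).any (fun i =>
    l[i]? == some '#' && (i == 0 || l[i-1]? == some ' ') && decide (i + 1 < l.length) &&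
    !(l[i+1]? == some '#') && !(decide (' ' ∈ l.drop (i+1))))

lemma pvDb_true_iff (l : List Char) : pvDb l = true ↔
    ∃ i, i < l.length ∧ l[i]? = some '#' ∧ (i = 0 ∨ l[i-1]? = some ' ') ∧
      i+1 < l.length ∧ l[i+1]? ≠ some '#' ∧ ' ' ∉ l.drop (i+1) := by
  simp [pvDb, List.any_eq_true]
  constructor
  · rintro ⟨x, hx, ⟨⟨⟨h1, h2⟩, h3⟩, h4⟩, h5⟩; exact ⟨x, hx, h1, h2, h3, h4, h5⟩
  · rintro ⟨i, hi, h1, h2, h3, h4, h5⟩; exact ⟨i, hi, ⟨⟨⟨h1, h2⟩, h3⟩, h4⟩, h5⟩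

lemma pvDb_false_elim {l : List Char} (h : pvDb l = false) (i : Nat) :
    ¬(i < l.length ∧ l[i]? = some '#' ∧ (i = 0 ∨ l[i-1]? = some ' ') ∧
      i+1 < l.length ∧ l[i+1]? ≠ some '#' ∧ ' ' ∉ l.drop (i+1)) := by
  intro hx
  have : pvDb l = true := (pvDb_true_iff l).mpr ⟨i, hx⟩
  rw [h] at this; cases this

lemma pvDb_decomp (u tr l : List Char) (hsplit : l = u ++ tr) (hts : ' ' ∉ tr)
    (hu : u = [] ∨ u.getLast? = some ' ') :
    pvDb l = true ↔ 2 ≤ tr.length ∧ tr[0]? = some '#' ∧ tr[1]? ≠ some '#' := by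
  rw [pvDb_true_iff]
  have hlen : l.length = u.length + tr.length := by rw [hsplit]; simp
  constructor
  · rintro ⟨i, hi, hhash, hws, hib, hnext, hnsp⟩
    have hieq : i = u.length := by
      rcases Nat.lt_trichotomy i u.length with h | h | h
      · exfalso
        have hune : u ≠ [] := by rintro rfl; simp at h
        rcases hu with rfl | hu
        · exact hune rfl
        · have hsp : l[u.length - 1]? = some ' ' := by
            rw [hsplit, List.getElem?_append_left (by
              have := List.length_pos_iff.mpr hune; omega),
              ← List.getLast?_eq_getElem?]
            exact hu
          by_cases hpi : u.length - 1 = i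
          · rw [hpi, hhash] at hsp
            simp at hsp
          · apply hnsp
            have hx : (l.drop (i+1))[u.length - 1 - (i+1)]? = some ' ' := by
              rw [List.getElem?_drop]
              have : i + 1 + (u.length - 1 - (i + 1)) = u.length - 1 := by omega
              rw [this]
              exact hsp
            exact List.mem_of_getElem? hx
      · exact h
      · exfalso
        rcases hws with rfl | hws
        · omega
        · apply hts
          rw [hsplit, List.getElem?_append_right (by omega)] at hws
          exact List.mem_of_getElem? hws
    subst hieq
    refine ⟨by omega, ?_, ?_⟩
    · rw [hsplit, List.getElem?_append_right (le_refl _), Nat.sub_self] at hhash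
      exact hhash
    · rw [hsplit, List.getElem?_append_right (by omega)] at hnext
      have : u.length + 1 - u.length = 1 := by omega
      rw [this] at hnext
      exact hnext
  · rintro ⟨h2, hh, hn⟩
    refine ⟨u.length, by omega, ?_, ?_, by omega, ?_, ?_⟩
    · rw [hsplit, List.getElem?_append_right (le_refl _), Nat.sub_self]
      exact hh
    · rcases hu with rfl | hu
      · exact Or.inl (by simp)
      · refine Or.inr ?_
        have hune : u ≠ [] := by rintro rfl; simp at hu
        have hul : 1 ≤ u.length := List.length_pos_iff.mpr hune
        rw [hsplit, List.getElem?_append_left (by omega), ← List.getLast?_eq_getElem?]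
        exact hu
    · rw [hsplit, List.getElem?_append_right (by omega)]
      have : u.length + 1 - u.length = 1 := by omega
      rw [this]
      exact hn
    · intro hx
      rw [hsplit, show u.length + 1 = u.length + 1 from rfl,
        List.drop_length_add_append] at hx
      exact hts (List.mem_of_mem_drop hx)

lemma D_iff (line : String) : D_get_tags_from_line line ↔ pvDb line.toList = true := by
  obtain ⟨u, tr, hsplit, htr, hts, hu⟩ :
      ∃ u tr, line.toList = u ++ tr ∧ tr = (line.toList.reverse.takeWhile pvNotSpace).reverse ∧
        (' ' ∉ tr) ∧ (u = [] ∨ u.getLast? = some ' ') := by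
    refine ⟨(line.toList.reverse.dropWhile pvNotSpace).reverse,
      (line.toList.reverse.takeWhile pvNotSpace).reverse, ?_, rfl, ?_, ?_⟩
    · conv_lhs => rw [← List.reverse_reverse line.toList,
        ← List.takeWhile_append_dropWhile (p := pvNotSpace) (l := line.toList.reverse)]
      rw [List.reverse_append]
    · intro hx
      have := List.mem_takeWhile_imp (List.mem_reverse.mp hx)
      simp [pvNotSpace] at this
    · cases hx : line.toList.reverse.dropWhile pvNotSpace with
      | nil => exact Or.inl (by simp)
      | cons a d' =>
        refine Or.inr ?_
        have ha := List.head?_dropWhile_not pvNotSpace line.toList.reverse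
        rw [hx] at ha
        simp only [List.head?_cons] at ha
        have ha' : a = ' ' := by simpa [pvNotSpace] using ha
        subst ha'
        simp
  have hrv : line.toList.reverse = tr.reverse ++ u.reverse := by
    rw [hsplit, List.reverse_append]
  have hidx : line.toList.reverse.idxOf ' ' = tr.length := by
    have htsr : ' ' ∉ tr.reverse := fun hx => hts (List.mem_reverse.mp hx)
    rcases hu with rfl | hu
    · rw [hrv]
      simp only [List.reverse_nil, List.append_nil]
      rw [List.idxOf_eq_length htsr, List.length_reverse]
    · have hune : u ≠ [] := by rintro rfl; simp at hu
      have hhead : u.reverse.head? = some ' ' := by rw [List.head?_reverse]; exact hu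
      cases hx : u.reverse with
      | nil => rw [hx] at hhead; simp at hhead
      | cons a rest =>
        rw [hx] at hhead
        simp only [List.head?_cons] at hhead
        have ha' : a = ' ' := Option.some_inj.mp hhead
        subst ha'
        rw [hrv, hx, List.idxOf_append_of_notMem htsr, List.idxOf_cons_self]
        simp
  rw [pvDb_decomp u tr line.toList hsplit hts hu]
  unfold D_get_tags_from_line
  rw [hidx]
  by_cases h2 : 2 ≤ tr.length
  · have h0 : line.toList.reverse[tr.length - 1]? = tr[0]? := by
      rw [hrv, List.getElem?_append_left (by simp; omega),
        List.getElem?_reverse (by omega)]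
      congr 1
      omega
    have h1 : line.toList.reverse[tr.length - 2]? = tr[1]? := by
      rw [hrv, List.getElem?_append_left (by simp; omega),
        List.getElem?_reverse (by omega)]
      congr 1
      omega
    rw [h0, h1]
  · constructor <;> (rintro ⟨h, -, -⟩; exact absurd h h2)

lemma pyGet?_zero {α : Type} (t : List α) : PySem.List.pyGet? t (0 : Int) = t[0]? := by
  simpa using PySem.List.pyGet?_natCast t 0

-- contribution of a word-initial '#' that is followed by a space later in the line
lemma gA_zero_hash (t rest : List Char) (ht : ' ' ∉ t) :
    pvGa (('#'::t) ++ ' ' :: rest) 0 = pvFb ('#'::t) := by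
  have hlen : 1 ≤ (('#'::t) ++ ' ' :: rest).length := by simp
  have hdrop : (('#'::t) ++ ' ' :: rest).drop 1 = t ++ ' ' :: rest := by simp
  have hfind : PySem.Chars.findFrom (('#'::t) ++ ' ' :: rest) [' '] ((0:Int) + 1)
      = ((1 + t.length : Nat) : Int) := by
    have h1 : ((0:Int) + 1) = ((1:Nat) : Int) := by norm_num
    rw [h1, PySem.Chars.findFrom_natCast _ _ 1 hlen, hdrop, find_first_space t rest ht,
      if_neg (by omega)]
    push_cast; ring
  have htag : pvTag (('#'::t) ++ ' ' :: rest) 0 = t := by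
    rw [pvTag, hfind]
    have h1 : ((0:Int) + 1) = ((1:Nat) : Int) := by norm_num
    rw [h1, PySem.List.slice_natCast, hdrop]
    have : 1 + t.length - 1 = t.length := by omega
    rw [this, List.take_left]
  rw [pvGa, if_pos (Or.inl rfl), htag]
  cases t with
  | nil => simp [pvFb]
  | cons a r =>
    rw [pyGet?_zero]
    by_cases ha : a = '#' <;> simp [pvFb, ha]

-- a '#' at position k + |u| of u ++ rest behaves like one at position k of rest,
-- provided u ends in a space
lemma gA_shift (u rest : List Char) (hu : u ≠ []) (hlast : u.getLast? = some ' ')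
    (k : Nat) (hk : k < rest.length) :
    pvGa (u ++ rest) ((k : Int) + u.length) = pvGa rest (k : Int) := by
  have hm1 : 1 ≤ u.length := List.length_pos_iff.mpr hu
  have hcond : ((k:Int) + u.length = 0 ∨ PySem.List.pyGet? (u ++ rest) ((k:Int) + u.length - 1) = some ' ')
      ↔ ((k:Int) = 0 ∨ PySem.List.pyGet? rest ((k:Int) - 1) = some ' ') := by
    by_cases hk0 : k = 0
    · subst hk0
      constructor
      · intro _; exact Or.inl (by norm_num)
      · intro _
        refine Or.inr ?_
        have h1 : ((0:Nat):Int) + u.length - 1 = ((u.length - 1 : Nat) : Int) := by push_cast; omega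
        rw [h1, PySem.List.pyGet?_natCast, List.getElem?_append_left (by omega)]
        rw [← List.getLast?_eq_getElem?]
        exact hlast
    · have h1 : (k:Int) + u.length - 1 = ((k + u.length - 1 : Nat) : Int) := by omega
      have h2 : (k:Int) - 1 = ((k - 1 : Nat) : Int) := by omega
      rw [h1, h2, PySem.List.pyGet?_natCast, PySem.List.pyGet?_natCast,
        List.getElem?_append_right (by omega)]
      have h3 : k + u.length - 1 - u.length = k - 1 := by omega
      rw [h3]
      constructor
      · rintro (h0 | h)
        · exact absurd h0 (by omega)
        · exact Or.inr h
      · rintro (h0 | h)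
        · exact absurd h0 (by simpa using hk0)
        · exact Or.inr h
  have htag : pvTag (u ++ rest) ((k:Int) + u.length) = pvTag rest (k:Int) := by
    have hlen : (u ++ rest).length = u.length + rest.length := by simp
    have ha : (k:Int) + u.length + 1 = ((k + u.length + 1 : Nat) : Int) := by push_cast; ring
    have hb : (k:Int) + 1 = ((k + 1 : Nat) : Int) := by push_cast; ring
    have hdropL : (u ++ rest).drop (k + u.length + 1) = rest.drop (k + 1) := by
      have : k + u.length + 1 = u.length + (k + 1) := by omega
      rw [this, List.drop_length_add_append]
    rw [pvTag, pvTag, ha, hb,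
      PySem.Chars.findFrom_natCast _ _ (k + u.length + 1) (by rw [hlen]; omega),
      PySem.Chars.findFrom_natCast _ _ (k + 1) (by omega), hdropL]
    set F := PySem.Chars.find (rest.drop (k + 1)) [' '] with hF
    by_cases hFn : F = -1
    · rw [if_pos hFn, if_pos hFn]
      have c1 := PySem.List.clampIdx_natCast (u ++ rest).length (k + u.length + 1)
      have c2 := PySem.List.clampIdx_neg_one (u ++ rest).length
      have c3 := PySem.List.clampIdx_natCast rest.length (k + 1)
      have c4 := PySem.List.clampIdx_neg_one rest.length
      simp only [PySem.List.slice, c1, c2, c3, c4]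
      have hdropL' : (u ++ rest).drop (min (k + u.length + 1) (u ++ rest).length)
          = rest.drop (min (k + 1) rest.length) := by
        have ha : min (k + u.length + 1) (u ++ rest).length = u.length + (k + 1) := by
          simp; omega
        have hb : min (k + 1) rest.length = k + 1 := by omega
        rw [ha, hb, List.drop_length_add_append]
      rw [hdropL']
      congr 1
      simp
      omega
    · have hF0 : 0 ≤ F := by have := PySem.Chars.neg_one_le_find (rest.drop (k+1)) [' ']; omega
      have hFle : F ≤ ((rest.drop (k+1)).length : Int) := PySem.Chars.find_le_length _ _
      rw [if_neg hFn, if_neg hFn,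
        PySem.List.slice_toNat _ (by positivity) (by omega),
        PySem.List.slice_toNat _ (by positivity) (by omega)]
      have h4 : ((k + u.length + 1 : Nat) : Int).toNat = k + u.length + 1 := by omega
      have h5 : ((k + 1 : Nat) : Int).toNat = k + 1 := by omega
      have h6 : (((k + u.length + 1 : Nat) : Int) + F).toNat - (k + u.length + 1)
          = F.toNat := by omega
      have h7 : (((k + 1 : Nat) : Int) + F).toNat - (k + 1) = F.toNat := by omega
      rw [h4, h5, h6, h7, hdropL]
  rw [pvGa, pvGa, htag]
  by_cases h : (k:Int) = 0 ∨ PySem.List.pyGet? rest ((k:Int) - 1) = some ' '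
  · rw [if_pos (hcond.mpr h), if_pos h]
  · rw [if_neg (fun hx => h (hcond.mp hx)), if_neg h]

-- '#' positions strictly inside a word never contribute
lemma shifted_none (l t : List Char) (h : ∀ k, k < t.length → l[k]? ≠ some ' ') :
    (pvHpos t).filterMap ((pvGa l) ∘ (· + 1)) = [] := by
  rw [List.filterMap_eq_nil_iff]
  intro i hi
  obtain ⟨kk, rfl, hkk, _⟩ := mem_pvHpos hi
  show pvGa l ((kk:Int) + 1) = none
  rw [pvGa, if_neg]
  rintro (h0 | hsp)
  · omega
  · have h1 : (kk:Int) + 1 - 1 = ((kk:Nat):Int) := by omega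
    rw [h1, PySem.List.pyGet?_natCast] at hsp
    exact h kk hkk hsp

lemma part1 (w rest : List Char) (hw : ' ' ∉ w) :
    (pvHpos w).filterMap (pvGa (w ++ ' ' :: rest)) = (pvFb w).toList := by
  cases w with
  | nil => simp [pvHpos, PySem.List.enumerate, pvFb]
  | cons c t =>
    rw [pvHpos_cons, List.filterMap_append, List.filterMap_map,
      shifted_none _ _ (fun k hkt hsp => by
        rw [List.getElem?_append_left (l₂ := ' ' :: rest) (by simp; omega)] at hsp
        exact hw (List.mem_of_getElem? hsp)), List.append_nil]
    by_cases hc : c = '#'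
    · subst hc
      have ht : ' ' ∉ t := fun hx => hw (List.mem_cons_of_mem _ hx)
      rw [if_pos rfl, filterMap_cons_toList, List.filterMap_nil, List.append_nil,
        gA_zero_hash t rest ht]
    · rw [if_neg hc]
      simp [pvFb, hc]

lemma case1 (l : List Char) (hl : ' ' ∉ l) (hdb : pvDb l = false) :
    pvAtags l = (pvWords l).filterMap pvFb := by
  rw [pvWords_of_not_mem hl, pvAtags]
  cases l with
  | nil => simp [pvHpos, PySem.List.enumerate, pvFb]
  | cons c t =>
    rw [pvHpos_cons, List.filterMap_append, List.filterMap_map,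
      shifted_none _ _ (fun k hkt hsp => hl (List.mem_of_getElem? hsp)), List.append_nil,
      filterMap_cons_toList, List.filterMap_nil, List.append_nil]
    by_cases hc : c = '#'
    · subst hc
      have ht : ' ' ∉ t := fun hx => hl (List.mem_cons_of_mem _ hx)
      have hfind : PySem.Chars.findFrom ('#'::t) [' '] ((0:Int) + 1) = -1 := by
        have h1 : ((0:Int) + 1) = ((1:Nat) : Int) := by norm_num
        rw [h1, PySem.Chars.findFrom_natCast _ _ 1 (by simp), List.drop_one, List.tail_cons,
          find_no_space t ht, if_pos rfl]
      have htag : pvTag ('#'::t) 0 = t.dropLast := by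
        rw [pvTag, hfind]
        have h1 : ((0:Int) + 1) = ((1:Nat) : Int) := by norm_num
        rw [h1]
        have c1 := PySem.List.clampIdx_natCast ('#'::t).length 1
        have c2 := PySem.List.clampIdx_neg_one ('#'::t).length
        simp only [PySem.List.slice, c1, c2]
        rcases t with _ | ⟨a, r⟩
        · simp
        · simp only [List.length_cons, min_def]
          rw [List.dropLast_eq_take]
          congr 1
      have hdisj : t = [] ∨ t[0]? = some '#' := by
        by_cases hlen1 : t.length = 0
        · exact Or.inl (List.eq_nil_of_length_eq_zero hlen1)
        · right
          by_contra hne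
          exact pvDb_false_elim hdb 0
            ⟨by simp, by simp, Or.inl rfl, by simp; omega, by simpa using hne,
             by simpa [List.drop_one] using ht⟩
      have hga : pvGa ('#'::t) 0 = pvFb ('#'::t) := by
        rw [pvGa, if_pos (Or.inl rfl), htag]
        rcases hdisj with rfl | h0
        · simp [pvFb]
        · have hfb : pvFb ('#'::t) = none := by
            rw [pvFb, if_neg]
            rintro ⟨-, -, hx⟩
            exact hx (by simpa using h0)
          rw [hfb, if_neg]
          rintro ⟨hlen, hget⟩
          apply hget
          rw [pyGet?_zero, List.getElem?_dropLast, if_pos (by simp at hlen; omega)]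
          exact h0
      rw [if_pos rfl, filterMap_cons_toList, List.filterMap_nil, List.append_nil, hga]
    · rw [if_neg hc]
      simp [pvFb, hc]

lemma db_mono (w rest : List Char) (h : pvDb (w ++ ' ' :: rest) = false) : pvDb rest = false := by
  cases hr : pvDb rest with
  | false => rfl
  | true =>
    exfalso
    rw [pvDb_true_iff] at hr
    obtain ⟨i, hi, hhash, hws, hib, hnext, hnsp⟩ := hr
    refine pvDb_false_elim h (w.length + 1 + i) ⟨by simp; omega, ?_, ?_, by simp; omega, ?_, ?_⟩
    · rw [List.getElem?_append_right (by omega)]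
      have : w.length + 1 + i - w.length = i + 1 := by omega
      rw [this, List.getElem?_cons_succ]
      exact hhash
    · refine Or.inr ?_
      by_cases hi0 : i = 0
      · subst hi0
        rw [List.getElem?_append_right (by omega)]
        have : w.length + 1 + 0 - 1 - w.length = 0 := by omega
        rw [this]
        simp
      · rcases hws with rfl | hws
        · exact absurd rfl hi0
        · rw [List.getElem?_append_right (by omega)]
          have : w.length + 1 + i - 1 - w.length = i := by omega
          rw [this]
          cases i with
          | zero => exact absurd rfl hi0
          | succ j =>
            rw [List.getElem?_cons_succ]
            simpa using hws
    · rw [List.getElem?_append_right (by omega)]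
      have : w.length + 1 + i + 1 - w.length = i + 1 + 1 := by omega
      rw [this, List.getElem?_cons_succ]
      exact hnext
    · have : w.length + 1 + i + 1 = w.length + (i + 2) := by omega
      rw [this, List.drop_length_add_append]
      simpa using hnsp

lemma space_decomp (l : List Char) (h : ' ' ∈ l) :
    l = l.takeWhile pvNotSpace ++ ' ' :: (l.dropWhile pvNotSpace).tail := by
  have hd : l.dropWhile pvNotSpace ≠ [] := by
    simp only [ne_eq, List.dropWhile_eq_nil_iff]
    intro hall; have := hall ' ' h; simp [pvNotSpace] at this
  cases hx : l.dropWhile pvNotSpace with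
  | nil => exact absurd hx hd
  | cons a t =>
    have ha := List.head?_dropWhile_not pvNotSpace l
    rw [hx] at ha
    simp only [List.head?_cons] at ha
    have ha' : a = ' ' := by simpa [pvNotSpace] using ha
    subst ha'
    conv_lhs => rw [← List.takeWhile_append_dropWhile (p := pvNotSpace) (l := l)]
    rw [hx]
    simp

lemma mainA_aux : ∀ (n : Nat) (l : List Char), l.length ≤ n → pvDb l = false →
    pvAtags l = (pvWords l).filterMap pvFb := by
  intro n
  induction n with
  | zero =>
    intro l hl hdb
    have hnil : l = [] := List.eq_nil_of_length_eq_zero (by omega)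
    subst hnil
    exact case1 [] (by simp) hdb
  | succ n ih =>
    intro l hl hdb
    by_cases hm : ' ' ∈ l
    · obtain ⟨w, r, hldecomp, hweq, hreq⟩ :
          ∃ w r, l = w ++ ' ' :: r ∧ w = l.takeWhile pvNotSpace ∧
            r = (l.dropWhile pvNotSpace).tail :=
        ⟨_, _, space_decomp l hm, rfl, rfl⟩
      have hwns : ' ' ∉ w := fun hx => by
        have := List.mem_takeWhile_imp (hweq ▸ hx); simp [pvNotSpace] at this
      rw [pvWords_of_mem hm, ← hweq, ← hreq, filterMap_cons_toList]
      have hrlen : r.length ≤ n := by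
        have := congrArg List.length hldecomp; simp at this; omega
      have hrdb : pvDb r = false := db_mono w r (hldecomp ▸ hdb)
      rw [pvAtags, hldecomp, pvHpos_append, List.filterMap_append, part1 w r hwns]
      congr 1
      rw [pvHpos_cons (' ') r, if_neg (by decide), List.nil_append, List.map_map,
        List.filterMap_map]
      have hcongr : ∀ i ∈ pvHpos r,
          (pvGa (w ++ ' ' :: r) ∘ ((· + (w.length : Int)) ∘ (· + 1))) i = pvGa r i := by
        intro i hi
        obtain ⟨k, rfl, hk, _⟩ := mem_pvHpos hi
        show pvGa (w ++ ' ' :: r) ((k : Int) + 1 + w.length) = pvGa r (k : Int)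
        have h1 : w ++ ' ' :: r = (w ++ [' ']) ++ r := by simp
        have h2 : ((k : Int) + 1 + w.length) = (k : Int) + (w ++ [' ']).length := by
          simp; ring
        rw [h1, h2]
        exact gA_shift (w ++ [' ']) r (by simp) (by simp) k hk
      rw [List.filterMap_congr hcongr]
      exact ih r hrlen hrdb
    · exact case1 l hm hdb

lemma mainA (l : List Char) (h : pvDb l = false) :
    pvAtags l = (pvWords l).filterMap pvFb :=
  mainA_aux l.length l le_rfl h

-- ===== VERDICT (by name: the statement is the Claim_ definition above) =====
theorem get_tags_from_line_spec : Claim_unchanged_get_tags_from_line := by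
  intro line _ hD
  have h : pvDb line.toList = false := by
    by_contra hc
    exact hD ((D_iff line).mpr (by revert hc; cases pvDb line.toList <;> simp))
  rw [portA_eq, portB_eq, mainA _ h]

theorem get_tags_from_line_changed : Claim_changed_get_tags_from_line := by
  unfold Claim_changed_get_tags_from_line; decide
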